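-- pv_equiv track=rewrite | github.com/jlanga/exfi | exfi/io/gfa1_to_splice_graph.py | _split_node2coord
-- ===== SOURCE A (Python) =====
-- def _split_node2coord(node2coord: dict, node2transcript: dict) -> dict:
--     """Split the big node2coord dict into its subcompoenents (transcripts)"""
--     splitted_node2coord = {key: dict() for key in set(node2transcript.values())}
--     for node, coordinates in node2coord.items():
--         transcript = node2transcript[node]
--         if node not in splitted_node2coord[transcript]:
--             splitted_node2coord[transcript][node] = tuple()
--         splitted_node2coord[transcript][node] += coordinates
--     return splitted_node2coord
-- ===== SOURCE B (Python) =====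
-- def _split_node2coord(node2coord: dict, node2transcript: dict) -> dict:
--     """Split the big node2coord dict into its subcomponents (transcripts)."""
--     return {
--         transcript: {
--             node: () + coordinates
--             for node, coordinates in node2coord.items()
--             if node2transcript[node] == transcript
--         }
--         for transcript in set(node2transcript.values())
--     }
-- ===== Notes on version B (the rewrite author's own statement) =====
-- stated objective: alternative
-- what changed: Replaces A's single pass with stateful nested-dict mutation by a nested dict comprehension that scans node2coord once per transcript, building each inner dict directly with no mutation.
-- outside the precondition, e.g. on _split_node2coord({'n': (1, 2)}, {}): A raises KeyError, B returns {}
import Mathlib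
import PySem

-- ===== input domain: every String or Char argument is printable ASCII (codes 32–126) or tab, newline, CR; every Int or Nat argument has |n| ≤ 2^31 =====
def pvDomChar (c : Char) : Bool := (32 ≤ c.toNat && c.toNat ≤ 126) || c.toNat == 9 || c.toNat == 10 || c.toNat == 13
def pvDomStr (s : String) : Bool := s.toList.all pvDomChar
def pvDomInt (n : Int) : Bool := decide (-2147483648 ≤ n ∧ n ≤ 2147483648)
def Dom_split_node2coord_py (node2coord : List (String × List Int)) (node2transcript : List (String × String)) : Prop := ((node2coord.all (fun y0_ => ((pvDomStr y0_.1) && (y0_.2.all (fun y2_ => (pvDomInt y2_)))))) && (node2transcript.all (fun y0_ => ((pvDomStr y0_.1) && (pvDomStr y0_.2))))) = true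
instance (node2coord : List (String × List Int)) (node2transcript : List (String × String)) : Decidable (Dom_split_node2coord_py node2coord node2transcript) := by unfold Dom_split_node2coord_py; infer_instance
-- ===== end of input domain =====

-- B replaces A's single stateful pass (mutating nested dicts) by a nested comprehension,
-- one scan of node2coord per transcript: an alternative decomposition, not claimed faster.
-- Equality is on return values; neither program mutates its arguments.

-- ===== PORT A =====
-- the loop body of A: fetch transcript, ensure the node slot exists, concatenate coordinates
def split_node2coord_py (node2coord : List (String × List Int)) (node2transcript : List (String × String)) : List (String × List (String × List Int)) :=
  let nc := PySem.Dict.ofList node2coord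
  let nt := PySem.Dict.ofList node2transcript
  -- splitted_node2coord = {key: dict() for key in set(node2transcript.values())}
  let splitted : PySem.Dict String (PySem.Dict String (List Int)) :=
    (PySem.Set.ofList nt.values).foldl (fun d key => d.insert key PySem.Dict.empty) PySem.Dict.empty
  -- for node, coordinates in node2coord.items(): …
  let splitted := nc.items.foldl (fun d p =>
    let transcript := (nt.get? p.1).getD ""   -- KeyError when none: excluded by Pre_
    let inner := d.getD transcript PySem.Dict.empty
    let inner := if inner.contains p.1 then inner else inner.insert p.1 []
    let inner := inner.insert p.1 (inner.getD p.1 [] ++ p.2)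
    d.insert transcript inner) splitted
  splitted.items.map (fun q => (q.1, q.2.items))

-- ===== PORT B =====
def split_node2coord_py_alt (node2coord : List (String × List Int)) (node2transcript : List (String × String)) : List (String × List (String × List Int)) :=
  let nc := PySem.Dict.ofList node2coord
  let nt := PySem.Dict.ofList node2transcript
  (PySem.Set.ofList nt.values).map (fun transcript =>
    (transcript,
     (nc.items.filter (fun p => (nt.get? p.1).getD "" == transcript)).map
       (fun p => (p.1, [] ++ p.2))))

-- ===== PRECONDITION & SPEC =====
-- Pre_ excludes exactly the inputs where A raises KeyError: some node of node2coord without an entry in node2transcript.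
def Pre_split_node2coord_py (node2coord : List (String × List Int)) (node2transcript : List (String × String)) : Prop :=
  (node2coord.all (fun p => (node2transcript.map (·.1)).contains p.1)) = true
instance (node2coord : List (String × List Int)) (node2transcript : List (String × String)) : Decidable (Pre_split_node2coord_py node2coord node2transcript) := by unfold Pre_split_node2coord_py; infer_instance
def pvWitness_split_node2coord_py : (List (String × List Int)) × (List (String × String)) :=
  ([("n1", [1, 2]), ("n2", [3])], [("n1", "tA"), ("n2", "tB"), ("n3", "tA")])
def Spec_split_node2coord_py (node2coord : List (String × List Int)) (node2transcript : List (String × String)) (out : List (String × List (String × List Int))) : Prop := out = split_node2coord_py_alt node2coord node2transcript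
instance (node2coord : List (String × List Int)) (node2transcript : List (String × String)) (out : List (String × List (String × List Int))) : Decidable (Spec_split_node2coord_py node2coord node2transcript out) := by unfold Spec_split_node2coord_py; infer_instance

-- ===== CLAIM (what is proved, stated in full; the proofs are below) =====
def Claim_equal_split_node2coord_py : Prop := ∀ (node2coord : List (String × List Int)) (node2transcript : List (String × String)), Dom_split_node2coord_py node2coord node2transcript → Pre_split_node2coord_py node2coord node2transcript → Spec_split_node2coord_py node2coord node2transcript (split_node2coord_py node2coord node2transcript)

-- ===== LEMMAS AND PROOFS =====

-- abbreviations used only by the proofs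
def pvStep (nt : PySem.Dict String String)
    (d : PySem.Dict String (PySem.Dict String (List Int))) (p : String × List Int) :
    PySem.Dict String (PySem.Dict String (List Int)) :=
  let transcript := (nt.get? p.1).getD ""
  let inner := d.getD transcript PySem.Dict.empty
  let inner := if inner.contains p.1 then inner else inner.insert p.1 []
  let inner := inner.insert p.1 (inner.getD p.1 [] ++ p.2)
  d.insert transcript inner

def pvInner (d : PySem.Dict String (List Int)) (p : String × List Int) :
    PySem.Dict String (List Int) :=
  let inner := if d.contains p.1 then d else d.insert p.1 []
  inner.insert p.1 (inner.getD p.1 [] ++ p.2)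

theorem pvStep_keys (nt : PySem.Dict String String)
    (d : PySem.Dict String (PySem.Dict String (List Int))) (p : String × List Int)
    (h : ((nt.get? p.1).getD "") ∈ d.keys) : (pvStep nt d p).keys = d.keys := by
  unfold pvStep
  exact PySem.Dict.keys_insert_of_contains _ _ (by simpa [PySem.Dict.contains_iff_mem_keys] using h)

theorem pvLoop_keys (nt : PySem.Dict String String)
    (l : List (String × List Int)) (d : PySem.Dict String (PySem.Dict String (List Int)))
    (h : ∀ p ∈ l, ((nt.get? p.1).getD "") ∈ d.keys) :
    (l.foldl (pvStep nt) d).keys = d.keys := by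
  induction l generalizing d with
  | nil => rfl
  | cons p l ih =>
    have hk := pvStep_keys nt d p (h p (by simp))
    simp only [List.foldl_cons]
    rw [ih (pvStep nt d p) (fun q hq => by rw [hk]; exact h q (List.mem_cons_of_mem _ hq)), hk]

theorem pvLoop_getD (nt : PySem.Dict String String)
    (l : List (String × List Int)) (d : PySem.Dict String (PySem.Dict String (List Int)))
    (t : String)
    (h : ∀ p ∈ l, ((nt.get? p.1).getD "") ∈ d.keys) :
    (l.foldl (pvStep nt) d).getD t PySem.Dict.empty =
      (l.filter (fun p => (nt.get? p.1).getD "" == t)).foldl pvInner (d.getD t PySem.Dict.empty) := by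
  induction l generalizing d with
  | nil => rfl
  | cons p l ih =>
    have hk := pvStep_keys nt d p (h p (by simp))
    have hrest : ∀ q ∈ l, ((nt.get? q.1).getD "") ∈ (pvStep nt d p).keys := by
      intro q hq; rw [hk]; exact h q (List.mem_cons_of_mem _ hq)
    simp only [List.foldl_cons, List.filter_cons]
    rw [ih (pvStep nt d p) hrest]
    by_cases ht : (nt.get? p.1).getD "" = t
    · simp only [ht, beq_self_eq_true, if_pos, List.foldl_cons]
      congr 1
      unfold pvStep pvInner
      simp only [ht, PySem.Dict.getD_insert_self]
    · have hne : ((nt.get? p.1).getD "" == t) = false := by simp [ht]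
      simp only [hne, if_neg, Bool.false_eq_true, not_false_iff]
      congr 1
      unfold pvStep
      exact PySem.Dict.getD_insert_of_ne _ _ _ (fun hc => ht hc.symm)

theorem pvInner_fold (l : List (String × List Int)) (d : PySem.Dict String (List Int))
    (hnd : d.keys.Nodup) (hfresh : ∀ p ∈ l, d.contains p.1 = false)
    (hl : (l.map (·.1)).Nodup) :
    (l.foldl pvInner d).items = d.items ++ l.map (fun p => (p.1, [] ++ p.2)) := by
  induction l generalizing d with
  | nil => simp
  | cons p l ih =>
    have hp : d.contains p.1 = false := hfresh p (by simp)
    have hstep : pvInner d p = d.insert p.1 ([] ++ p.2) := by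
      unfold pvInner
      simp only [hp, Bool.false_eq_true, if_neg, not_false_iff,
        PySem.Dict.getD_insert_self, PySem.Dict.insert_insert_self]
    rw [List.foldl_cons, hstep]
    have hmap := hl
    simp only [List.map_cons, List.nodup_cons] at hmap
    have hnd' : (d.insert p.1 ([] ++ p.2)).keys.Nodup := PySem.Dict.nodup_keys_insert _ _ _ hnd
    have hfresh' : ∀ q ∈ l, (d.insert p.1 ([] ++ p.2)).contains q.1 = false := by
      intro q hq
      have hq1 : q.1 ≠ p.1 := by
        intro he; exact hmap.1 (he ▸ List.mem_map_of_mem hq)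
      simp [PySem.Dict.contains_insert, hq1, hfresh q (List.mem_cons_of_mem _ hq)]
    rw [ih _ hnd' hfresh' hmap.2]
    rw [PySem.Dict.items_insert_of_not_contains _ _ hp]
    simp

theorem split_eq (node2coord : List (String × List Int)) (node2transcript : List (String × String))
    (hpre : Pre_split_node2coord_py node2coord node2transcript) :
    split_node2coord_py node2coord node2transcript = split_node2coord_py_alt node2coord node2transcript := by
  unfold split_node2coord_py split_node2coord_py_alt
  set nc := PySem.Dict.ofList node2coord with hnc
  set nt := PySem.Dict.ofList node2transcript with hnt
  set S := PySem.Set.ofList nt.values with hS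
  set init : PySem.Dict String (PySem.Dict String (List Int)) :=
    S.foldl (fun d key => d.insert key PySem.Dict.empty) PySem.Dict.empty with hinit
  -- the keys of init are exactly S, with empty inner dicts
  have hSnodup : S.Nodup := PySem.Set.nodup_ofList _
  have hinit_items : init.items = S.map (fun k => (k, (PySem.Dict.empty : PySem.Dict String (List Int)))) := by
    rw [hinit]
    have := PySem.Dict.items_foldl_insert_fresh (l := S) (k := fun x => x)
      (v := fun _ => (PySem.Dict.empty : PySem.Dict String (List Int)))
      (d := PySem.Dict.empty) (by intro a _; rfl) (by simpa using hSnodup)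
    simpa using this
  have hinit_keys : init.keys = S := by
    simp only [PySem.Dict.keys, hinit_items, List.map_map]
    exact List.map_id' S
  have hinit_nodup : init.keys.Nodup := by rw [hinit_keys]; exact hSnodup
  -- every transcript looked up by the loop is a key of init
  have hkeys_ofList : ∀ (ns : List (String × String)),
      (PySem.Dict.ofList ns).keys = PySem.Set.ofList (ns.map (·.1)) := by
    intro ns
    show ((ns.foldl (fun d p => d.insert p.1 p.2) PySem.Dict.empty)).keys = _
    rw [PySem.Dict.keys_foldl_insert_key ns (·.1) (fun _ p => p.2) PySem.Dict.empty]
    simp [PySem.Dict.keys_empty, PySem.Set.update_nil_left]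
  have hkeys_ofList' : ∀ (ns : List (String × List Int)),
      (PySem.Dict.ofList ns).keys = PySem.Set.ofList (ns.map (·.1)) := by
    intro ns
    show ((ns.foldl (fun d p => d.insert p.1 p.2) PySem.Dict.empty)).keys = _
    rw [PySem.Dict.keys_foldl_insert_key ns (·.1) (fun _ p => p.2) PySem.Dict.empty]
    simp [PySem.Dict.keys_empty, PySem.Set.update_nil_left]
  have htr : ∀ p ∈ nc.items, ((nt.get? p.1).getD "") ∈ init.keys := by
    intro p hp
    rw [hinit_keys, hS]
    have hkey : p.1 ∈ node2coord.map (·.1) := by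
      have h1 := PySem.Dict.mem_keys_of_mem_items nc hp
      rw [hnc, hkeys_ofList', PySem.Set.mem_ofList] at h1
      exact h1
    have hknt : p.1 ∈ nt.keys := by
      rw [hnt, hkeys_ofList, PySem.Set.mem_ofList]
      have := hpre
      unfold Pre_split_node2coord_py at this
      rw [List.all_eq_true] at this
      rcases List.mem_map.mp hkey with ⟨q, hq, he⟩
      have := this q hq
      rw [List.contains_iff_mem] at this
      simpa [he] using this
    have hsome : nt.get? p.1 ≠ none := by
      rw [Ne, PySem.Dict.get?_eq_none_iff_not_mem_keys]
      simpa using hknt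
    rcases Option.ne_none_iff_exists'.mp hsome with ⟨v, hv⟩
    have hvitems : (p.1, v) ∈ nt.items := PySem.Dict.mem_items_of_get?_eq_some nt hv
    have hvin : v ∈ nt.values := List.mem_map_of_mem hvitems
    rw [PySem.Set.mem_ofList]
    simpa [hv] using hvin
  -- inner fold keys are fresh and distinct
  have hnc_nodup : (nc.items.map (·.1)).Nodup := PySem.Dict.nodup_keys_ofList _
  -- pointwise description of the loop result
  have hfinal_keys : (nc.items.foldl (pvStep nt) init).keys = S := by
    rw [pvLoop_keys nt _ _ htr, hinit_keys]
  have hfinal_nodup : (nc.items.foldl (pvStep nt) init).keys.Nodup := by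
    rw [hfinal_keys]; exact hSnodup
  have hitems := PySem.Dict.items_eq_map_keys (nc.items.foldl (pvStep nt) init) hfinal_nodup PySem.Dict.empty
  show (nc.items.foldl (pvStep nt) init).items.map (fun q => (q.1, q.2.items)) = _
  rw [hitems, hfinal_keys, List.map_map]
  apply List.map_congr_left
  intro t htS
  have hgetD : (nc.items.foldl (pvStep nt) init).getD t PySem.Dict.empty =
      (nc.items.filter (fun p => (nt.get? p.1).getD "" == t)).foldl pvInner
        (init.getD t PySem.Dict.empty) := pvLoop_getD nt _ _ t htr
  have hinitt : init.getD t PySem.Dict.empty = PySem.Dict.empty := by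
    exact PySem.Dict.getD_of_mem_items init (by rw [hinit_items]; exact List.mem_map_of_mem htS) hinit_nodup PySem.Dict.empty
  have hfilter_nodup : ((nc.items.filter (fun p => (nt.get? p.1).getD "" == t)).map (·.1)).Nodup := by
    exact List.Nodup.sublist (List.Sublist.map _ List.filter_sublist) hnc_nodup
  have hfold := pvInner_fold (nc.items.filter (fun p => (nt.get? p.1).getD "" == t))
    PySem.Dict.empty (by simp [PySem.Dict.keys_empty]) (by intro p _; simp [PySem.Dict.contains_empty]) hfilter_nodup
  simp only [Function.comp, hgetD, hinitt, hfold]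
  simp [PySem.Dict.empty]

-- ===== VERDICT (by name: the statement is the Claim_ definition above) =====
theorem split_node2coord_py_spec : Claim_equal_split_node2coord_py := by
  intro node2coord node2transcript _ hpre
  unfold Spec_split_node2coord_py
  exact split_eq node2coord node2transcript hpre
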